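-- pv_equiv track=rewrite | github.com/tomelisse/algo-hackerrank | graph_theory/journey_to_the_moon.py | nationalities
-- ===== SOURCE A (Python) =====
-- def connected(graph, person, visited):
--     ''' calculates the number of nodes in a connected subgraph'''
--     visited[person] = True
--     counts = 1
--     for neighbour in graph[person]:
--         if neighbour not in visited:
--             counts += connected(graph, neighbour, visited)
--     return counts
--
-- def nationalities(graph, n):
--     ''' calculates the number of people of each nationality'''
--     #visited = {person : False for person in range(n)}
--     visited = dict()
--     counts = []
--     for person in graph:
--         if person not in visited:
--             counts.append(connected(graph, person, visited))
--     singles = n - len(visited)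
--     for single in range(singles):
--         counts.append(1)
--     return counts
-- ===== SOURCE B (Python) =====
-- def nationalities(graph, n):
--     ''' calculates the number of people of each nationality'''
--     visited = set()
--     counts = []
--     for person in graph:
--         if person in visited:
--             continue
--         stack = [person]
--         count = 0
--         while stack:
--             node = stack.pop(0)
--             if node in visited:
--                 continue
--             visited.add(node)
--             count += 1
--             stack = graph[node] + stack
--         counts.append(count)
--     counts.extend([1] * (n - len(visited)))
--     return counts
-- ===== Notes on version B (the rewrite author's own statement) =====
-- stated objective: alternative
-- what changed: The recursive depth-first search `connected` (which can hit Python's recursion limit) is replaced by an iterative flood fill that pops pending nodes from an explicit worklist and tracks visited people in a set instead of a dict; the trailing 1-counts are produced by list multiplication instead of a range loop.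
import Mathlib
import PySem

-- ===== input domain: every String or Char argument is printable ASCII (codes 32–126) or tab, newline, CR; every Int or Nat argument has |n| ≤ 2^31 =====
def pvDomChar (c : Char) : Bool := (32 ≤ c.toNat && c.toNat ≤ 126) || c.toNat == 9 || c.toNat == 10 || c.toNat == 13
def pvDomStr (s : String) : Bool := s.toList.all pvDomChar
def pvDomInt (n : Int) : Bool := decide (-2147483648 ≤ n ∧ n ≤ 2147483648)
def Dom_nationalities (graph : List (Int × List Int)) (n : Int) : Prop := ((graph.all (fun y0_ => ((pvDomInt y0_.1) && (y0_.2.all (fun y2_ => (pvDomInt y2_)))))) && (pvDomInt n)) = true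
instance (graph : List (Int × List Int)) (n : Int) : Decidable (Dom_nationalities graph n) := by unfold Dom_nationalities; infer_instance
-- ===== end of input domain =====

-- B replaces A's recursive DFS by an iterative worklist flood fill over a visited SET;
-- equivalence of the RETURN value is what is proved (neither program mutates its arguments).

-- ===== PORT A =====
-- body of A's inner `for neighbour in graph[person]` loop (named so both ports can share nothing)
def pvStep (rec : Int → PySem.Dict Int Bool → Int × PySem.Dict Int Bool)
    (acc : Int × PySem.Dict Int Bool) (neighbour : Int) : Int × PySem.Dict Int Bool :=
  if acc.2.contains neighbour then acc
  else
    let r := rec neighbour acc.2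
    (acc.1 + r.1, r.2)

-- `connected(graph, person, visited)`; fuel is proof apparatus only (A recurses only on
-- unvisited people, so `g.size + 1` fuel is never exhausted — proved in the lemmas below).
def pvConnected (g : PySem.Dict Int (List Int)) : Nat → Int → PySem.Dict Int Bool → Int × PySem.Dict Int Bool
  | 0, _, visited => (1, visited)
  | fuel+1, person, visited =>
      -- visited[person] = True; counts = 1; for neighbour in graph[person]: …
      -- (graph[person] via getD: Pre_ excludes the KeyError of a missing key)
      (g.getD person []).foldl (pvStep (pvConnected g fuel)) (1, visited.insert person true)

def nationalities (graph : List (Int × List Int)) (n : Int) : List Int :=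
  let g := PySem.Dict.ofList graph
  let res := g.keys.foldl
    (fun (acc : List Int × PySem.Dict Int Bool) person =>
      if acc.2.contains person then acc
      else
        let r := pvConnected g (g.size + 1) person acc.2
        (acc.1 ++ [r.1], r.2))
    ([], PySem.Dict.empty)
  let singles : Int := n - (res.2.size : Int)
  res.1 ++ (PySem.List.pyRange 0 singles 1).map (fun _ => (1 : Int))

-- ===== PORT B =====
-- number of graph keys not yet visited: termination measure of the worklist loop
def pvUnvis (g : PySem.Dict Int (List Int)) (vis : List Int) : Nat :=
  (g.keys.filter (fun k => !(PySem.Set.contains vis k))).length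

theorem pvUnvis_lt_of_mem {g : PySem.Dict Int (List Int)} {vis : List Int} {node : Int}
    (hk : node ∈ g.keys) (hv : node ∉ vis) :
    pvUnvis g (PySem.Set.add vis node) < pvUnvis g vis := by
  unfold pvUnvis
  obtain ⟨l1, l2, hsplit⟩ := List.append_of_mem hk
  rw [hsplit]
  have hmono : ∀ a : Int, (!(PySem.Set.contains (PySem.Set.add vis node) a)) = true →
      (!(PySem.Set.contains vis a)) = true := by
    intro a ha
    simp only [PySem.Set.contains_eq_listContains, List.contains_eq_mem, Bool.not_eq_true',
      decide_eq_false_iff_not] at ha ⊢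
    intro hm
    exact ha ((PySem.Set.mem_add vis node a).mpr (Or.inl hm))
  have h1 := (List.monotone_filter_right l1 hmono).length_le
  have h2 := (List.monotone_filter_right l2 hmono).length_le
  have hnew : (!(PySem.Set.contains (PySem.Set.add vis node) node)) = false := by
    have := (PySem.Set.mem_add vis node node).mpr (Or.inr rfl)
    simp [PySem.Set.contains_eq_listContains, List.contains_eq_mem, this]
  have hold : (!(PySem.Set.contains vis node)) = true := by
    simp only [PySem.Set.contains_eq_listContains, List.contains_eq_mem, Bool.not_eq_true',
      decide_eq_false_iff_not]
    exact hv
  simp only [List.filter_append, List.filter_cons, hnew, hold, Bool.false_eq_true, if_false,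
    if_true, List.length_append, List.length_cons]
  omega

theorem pvUnvis_add_not_key {g : PySem.Dict Int (List Int)} {vis : List Int} {node : Int}
    (hk : node ∉ g.keys) :
    pvUnvis g (PySem.Set.add vis node) = pvUnvis g vis := by
  unfold pvUnvis
  congr 1
  apply List.filter_congr
  intro k hkk
  have hne : k ≠ node := fun e => hk (e ▸ hkk)
  simp only [PySem.Set.contains_eq_listContains, List.contains_eq_mem]
  have : (k ∈ PySem.Set.add vis node) ↔ (k ∈ vis) := by
    rw [PySem.Set.mem_add]
    exact ⟨fun h => h.resolve_right hne, Or.inl⟩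
  simp [this]

-- the `while stack:` loop of Source B
def pvFlood (g : PySem.Dict Int (List Int)) : List Int → PySem.Set Int → Int → Int × PySem.Set Int
  | [], vis, count => (count, vis)
  | node :: rest, vis, count =>
      if PySem.Set.contains vis node then pvFlood g rest vis count
      else pvFlood g (g.getD node [] ++ rest) (PySem.Set.add vis node) (count + 1)
  termination_by stack vis _ => (pvUnvis g vis, stack.length)
  decreasing_by
  · exact Prod.Lex.right _ (by simp)
  · rename_i h
    by_cases hk : node ∈ g.keys
    · exact Prod.Lex.left _ _ (pvUnvis_lt_of_mem hk (by simpa using h))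
    · rw [pvUnvis_add_not_key hk]
      have hb : PySem.Dict.contains g node = false := by
        rw [Bool.eq_false_iff]; simpa [PySem.Dict.contains_iff_mem_keys] using hk
      rw [PySem.Dict.getD_of_not_contains _ _ hb]
      exact Prod.Lex.right _ (by simp)

def nationalities_alt (graph : List (Int × List Int)) (n : Int) : List Int :=
  let g := PySem.Dict.ofList graph
  let res := g.keys.foldl
    (fun (acc : List Int × PySem.Set Int) person =>
      if PySem.Set.contains acc.2 person then acc
      else
        let r := pvFlood g [person] acc.2 0
        (acc.1 ++ [r.1], r.2))
    ([], PySem.Set.empty)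
  res.1 ++ List.replicate (n - (PySem.Set.len res.2)).toNat 1

-- ===== PRECONDITION & SPEC =====
-- Pre_ excludes exactly the inputs on which A raises KeyError: some neighbour listed in the
-- dict is not itself a key of the dict (A indexes graph[neighbour] for every reached neighbour).
def Pre_nationalities (graph : List (Int × List Int)) (n : Int) : Prop :=
  ∀ pr ∈ (PySem.Dict.ofList graph).items, ∀ m ∈ pr.2, (PySem.Dict.ofList graph).contains m = true
instance (graph : List (Int × List Int)) (n : Int) : Decidable (Pre_nationalities graph n) := by
  unfold Pre_nationalities; infer_instance

def pvWitness_nationalities : (List (Int × List Int)) × Int := ([(0, [1]), (1, [0]), (2, [])], 5)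

def Spec_nationalities (graph : List (Int × List Int)) (n : Int) (out : List Int) : Prop := out = nationalities_alt graph n
instance (graph : List (Int × List Int)) (n : Int) (out : List Int) : Decidable (Spec_nationalities graph n out) := by unfold Spec_nationalities; infer_instance

-- ===== CLAIM (what is proved, stated in full; the proofs are below) =====
def Claim_equal_nationalities : Prop := ∀ (graph : List (Int × List Int)) (n : Int), Dom_nationalities graph n → Pre_nationalities graph n → Spec_nationalities graph n (nationalities graph n)

-- ===== LEMMAS AND PROOFS =====

-- Set-membership test on a dict's key list agrees with the dict's own `contains`
theorem pvContains_keys (v : PySem.Dict Int Bool) (x : Int) :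
    PySem.Set.contains v.keys x = PySem.Dict.contains v x := by
  have h : (PySem.Set.contains v.keys x = true) ↔ (PySem.Dict.contains v x = true) := by
    rw [PySem.Set.contains_iff, PySem.Dict.contains_iff_mem_keys]
  cases hc : PySem.Dict.contains v x
  · cases hs : PySem.Set.contains v.keys x
    · rfl
    · exact absurd (h.mp hs) (by simp [hc])
  · exact h.mpr hc

theorem pvUnvis_le_of_subset {g : PySem.Dict Int (List Int)} {vis1 vis2 : List Int}
    (h : ∀ k, k ∈ vis1 → k ∈ vis2) : pvUnvis g vis2 ≤ pvUnvis g vis1 := by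
  unfold pvUnvis
  refine (List.monotone_filter_right _ ?_).length_le
  intro a ha
  simp only [PySem.Set.contains_eq_listContains, List.contains_eq_mem, Bool.not_eq_eq_eq_not,
    Bool.not_true, decide_eq_false_iff_not] at ha ⊢
  exact fun hm => ha (h a hm)

theorem pvUnvis_le_size (g : PySem.Dict Int (List Int)) (vis : List Int) :
    pvUnvis g vis ≤ g.size := by
  unfold pvUnvis
  calc _ ≤ g.keys.length := List.length_filter_le _ _
  _ = g.size := by simp [PySem.Dict.keys, PySem.Dict.size]

theorem pvUnvis_pos {g : PySem.Dict Int (List Int)} {vis : List Int} {node : Int}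
    (hk : node ∈ g.keys) (hv : node ∉ vis) : 1 ≤ pvUnvis g vis := by
  unfold pvUnvis
  have : node ∈ g.keys.filter (fun k => !(PySem.Set.contains vis k)) := by
    simp only [List.mem_filter]
    exact ⟨hk, by simp [PySem.Set.contains_eq_listContains, hv]⟩
  have := List.length_pos_of_mem this
  omega

-- accumulator shift for A's inner fold
theorem pvFold_shift (g : PySem.Dict Int (List Int)) (f : Nat) :
    ∀ (ns : List Int) (c : Int) (v : PySem.Dict Int Bool),
      ns.foldl (pvStep (pvConnected g f)) (c, v)
        = (c + (ns.foldl (pvStep (pvConnected g f)) (0, v)).1,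
           (ns.foldl (pvStep (pvConnected g f)) (0, v)).2) := by
  intro ns
  induction ns with
  | nil => intro c v; simp
  | cons nb ns ih =>
    intro c v
    simp only [List.foldl_cons, pvStep]
    by_cases hc : PySem.Dict.contains v nb = true
    · simp only [hc, if_true]
      exact ih c v
    · simp only [hc, if_false, Bool.false_eq_true]
      rw [ih (c + (pvConnected g f nb v).1), ih ((0 : Int) + (pvConnected g f nb v).1)]
      simp only [Prod.mk.injEq]
      exact ⟨by ring, trivial⟩

-- the simulation: A's inner fold over a pending list ≙ B's worklist loop
theorem pvSim (g : PySem.Dict Int (List Int))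
    (hg : ∀ pr ∈ g.items, ∀ m ∈ pr.2, m ∈ g.keys) :
    ∀ (mu : Nat) (f : Nat) (ns : List Int), ∀ (rest : List Int) (v : PySem.Dict Int Bool) (count : Int),
      (∀ m ∈ ns, m ∈ g.keys) →
      pvUnvis g v.keys ≤ mu → pvUnvis g v.keys ≤ f →
      (pvFlood g (ns ++ rest) v.keys count
        = pvFlood g rest (ns.foldl (pvStep (pvConnected g f)) (0, v)).2.keys
            (count + (ns.foldl (pvStep (pvConnected g f)) (0, v)).1))
      ∧ ∃ ext, (ns.foldl (pvStep (pvConnected g f)) (0, v)).2.keys = v.keys ++ ext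
            ∧ ∀ k ∈ ext, k ∈ g.keys := by
  intro mu
  induction mu using Nat.strong_induction_on with
  | _ mu IH =>
  intro f ns
  induction ns with
  | nil =>
    intro rest v count _ _ _
    exact ⟨by simp, [], by simp, by simp⟩
  | cons nb ns ih =>
    intro rest v count hns hmu hf
    have hnbk : nb ∈ g.keys := hns nb (by simp)
    by_cases hc : PySem.Dict.contains v nb = true
    · -- neighbour already visited: both sides skip it
      have hB : pvFlood g ((nb :: ns) ++ rest) v.keys count = pvFlood g (ns ++ rest) v.keys count := by
        rw [List.cons_append, pvFlood, pvContains_keys, hc]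
        simp
      have hA : (nb :: ns).foldl (pvStep (pvConnected g f)) (0, v)
          = ns.foldl (pvStep (pvConnected g f)) (0, v) := by
        simp [pvStep, hc]
      rw [hA, hB]
      exact ih rest v count (fun m hm => hns m (by simp [hm])) hmu hf
    · -- unvisited: A recurses, B pushes the adjacency list
      have hcf : PySem.Dict.contains v nb = false := by
        cases h : PySem.Dict.contains v nb
        · rfl
        · exact absurd h hc
      have hnbv : nb ∉ v.keys := fun hm => hc ((PySem.Dict.contains_iff_mem_keys v nb).mpr hm)
      have hone : 1 ≤ pvUnvis g v.keys := pvUnvis_pos hnbk hnbv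
      -- f and mu are positive
      cases f with
      | zero => omega
      | succ f' =>
      -- adjacency list of nb, all of whose members are keys
      have hsome : g.get? nb = some (g.getD nb []) := by
        have : (g.get? nb).isSome := by
          cases hq : g.get? nb
          · exfalso
            have := (PySem.Dict.get?_eq_none_iff_not_mem_keys (d := g) (k := nb)).mp hq
            exact this hnbk
          · simp
        cases hq : g.get? nb with
        | none => rw [hq] at this; simp at this
        | some a => rw [PySem.Dict.getD_eq_get?_getD, hq]; rfl
      have hadj : ∀ m ∈ g.getD nb [], m ∈ g.keys :=
        fun m hm => hg (nb, g.getD nb []) (PySem.Dict.mem_items_of_get?_eq_some g hsome) m hm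
      -- keys after marking nb
      have hkeysins : (v.insert nb true).keys = v.keys ++ [nb] :=
        PySem.Dict.keys_insert_of_not_contains v true hcf
      have hlt : pvUnvis g (v.keys ++ [nb]) < pvUnvis g v.keys := by
        rw [← PySem.Set.add_of_not_mem hnbv]
        exact pvUnvis_lt_of_mem hnbk hnbv
      have hmu1 : 1 ≤ mu := le_trans hone hmu
      -- outer induction hypothesis on the adjacency list
      obtain ⟨hsim1, ext1, hkeys1, hext1⟩ :=
        IH (mu - 1) (by omega) f' (g.getD nb []) (ns ++ rest) (v.insert nb true) (count + 1)
          hadj (by rw [hkeysins]; omega) (by rw [hkeysins]; omega)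
      set t := (g.getD nb []).foldl (pvStep (pvConnected g f')) (0, v.insert nb true) with ht
      -- B makes one step
      have hB : pvFlood g ((nb :: ns) ++ rest) v.keys count
          = pvFlood g (g.getD nb [] ++ (ns ++ rest)) (v.insert nb true).keys (count + 1) := by
        rw [List.cons_append, pvFlood]
        have : PySem.Set.contains v.keys nb = false := by rw [pvContains_keys]; exact hcf
        rw [this]
        simp only [Bool.false_eq_true, if_false]
        rw [PySem.Set.add_of_not_mem hnbv, hkeysins]
      -- A makes one step
      have hr : pvConnected g (f' + 1) nb v = (1 + t.1, t.2) := by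
        rw [pvConnected, pvFold_shift]
      have hA : (nb :: ns).foldl (pvStep (pvConnected g (f' + 1))) (0, v)
          = (1 + t.1 + (ns.foldl (pvStep (pvConnected g (f' + 1))) (0, t.2)).1,
             (ns.foldl (pvStep (pvConnected g (f' + 1))) (0, t.2)).2) := by
        simp only [List.foldl_cons]
        rw [show pvStep (pvConnected g (f' + 1)) (0, v) nb = (1 + t.1, t.2) by
          simp only [pvStep, hcf, Bool.false_eq_true, if_false, hr]; ring_nf]
        rw [pvFold_shift]
      -- inner induction hypothesis on the remaining neighbours
      have hsub2 : pvUnvis g t.2.keys ≤ pvUnvis g (v.keys ++ [nb]) := by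
        rw [hkeys1, hkeysins]
        exact pvUnvis_le_of_subset (fun k hk => by simp at hk ⊢; tauto)
      obtain ⟨hsim2, ext2, hkeys2, hext2⟩ :=
        ih rest t.2 (count + 1 + t.1)
          (fun m hm => hns m (by simp [hm])) (by omega) (by omega)
      refine ⟨?_, [nb] ++ ext1 ++ ext2, ?_, ?_⟩
      · rw [hB, hsim1, hA]
        rw [hsim2]
        ring_nf
      · rw [hA]
        rw [hkeys2, hkeys1, hkeysins]
        simp
      · intro k hk
        simp only [List.mem_append, List.mem_singleton] at hk
        rcases hk with (hk | hk) | hk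
        · exact hk ▸ hnbk
        · exact hext1 k hk
        · exact hext2 k hk

-- the outer loop over the dict's keys
theorem pvTop (g : PySem.Dict Int (List Int))
    (hg : ∀ pr ∈ g.items, ∀ m ∈ pr.2, m ∈ g.keys) :
    ∀ (ks : List Int), (∀ k ∈ ks, k ∈ g.keys) → ∀ (v : PySem.Dict Int Bool) (cs : List Int),
      (ks.foldl (fun (acc : List Int × PySem.Set Int) person =>
          if PySem.Set.contains acc.2 person then acc
          else
            let r := pvFlood g [person] acc.2 0
            (acc.1 ++ [r.1], r.2)) (cs, v.keys)).1
        = (ks.foldl (fun (acc : List Int × PySem.Dict Int Bool) person =>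
            if acc.2.contains person then acc
            else
              let r := pvConnected g (g.size + 1) person acc.2
              (acc.1 ++ [r.1], r.2)) (cs, v)).1
      ∧ (ks.foldl (fun (acc : List Int × PySem.Set Int) person =>
          if PySem.Set.contains acc.2 person then acc
          else
            let r := pvFlood g [person] acc.2 0
            (acc.1 ++ [r.1], r.2)) (cs, v.keys)).2
        = (ks.foldl (fun (acc : List Int × PySem.Dict Int Bool) person =>
            if acc.2.contains person then acc
            else
              let r := pvConnected g (g.size + 1) person acc.2
              (acc.1 ++ [r.1], r.2)) (cs, v)).2.keys := by
  intro ks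
  induction ks with
  | nil => intro _ v cs; exact ⟨rfl, rfl⟩
  | cons person ks ih =>
    intro hks v cs
    have hpk : person ∈ g.keys := hks person (by simp)
    simp only [List.foldl_cons]
    rw [pvContains_keys]
    by_cases hc : PySem.Dict.contains v person = true
    · simp only [hc, if_true]
      exact ih (fun k hk => hks k (by simp [hk])) v cs
    · have hcf : PySem.Dict.contains v person = false := by
        cases h : PySem.Dict.contains v person
        · rfl
        · exact absurd h hc
      have hpv : person ∉ v.keys := fun hm => hc ((PySem.Dict.contains_iff_mem_keys v person).mpr hm)
      simp only [hcf, Bool.false_eq_true, if_false]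
      have hkeysins : (v.insert person true).keys = v.keys ++ [person] :=
        PySem.Dict.keys_insert_of_not_contains v true hcf
      have hsome : g.get? person = some (g.getD person []) := by
        have hiss : (g.get? person).isSome := by
          cases hq : g.get? person
          · exfalso
            exact (PySem.Dict.get?_eq_none_iff_not_mem_keys (d := g) (k := person)).mp hq hpk
          · simp
        cases hq : g.get? person with
        | none => rw [hq] at hiss; simp at hiss
        | some a => rw [PySem.Dict.getD_eq_get?_getD, hq]; rfl
      have hadj : ∀ m ∈ g.getD person [], m ∈ g.keys :=
        fun m hm => hg (person, g.getD person []) (PySem.Dict.mem_items_of_get?_eq_some g hsome) m hm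
      obtain ⟨hsim, ext1, hkeys1, _⟩ :=
        pvSim g hg (pvUnvis g (v.insert person true).keys) g.size (g.getD person []) []
          (v.insert person true) 1 hadj (le_refl _) (pvUnvis_le_size g _)
      set t := (g.getD person []).foldl (pvStep (pvConnected g g.size)) (0, v.insert person true) with ht
      have hBstep : pvFlood g [person] v.keys 0 = (1 + t.1, t.2.keys) := by
        have h1 : pvFlood g [person] v.keys 0
            = pvFlood g (g.getD person [] ++ []) (v.insert person true).keys (0 + 1) := by
          rw [show [person] = person :: [] from rfl, pvFlood]
          have hcs : PySem.Set.contains v.keys person = false := by rw [pvContains_keys]; exact hcf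
          rw [hcs]
          simp only [Bool.false_eq_true, if_false]
          rw [PySem.Set.add_of_not_mem hpv, hkeysins]
        rw [h1, show ((0:Int)+1) = 1 by norm_num, hsim, pvFlood]
      have hAstep : pvConnected g (g.size + 1) person v = (1 + t.1, t.2) := by
        rw [pvConnected, pvFold_shift]
      rw [hBstep, hAstep]
      exact ih (fun k hk => hks k (by simp [hk])) t.2 (cs ++ [1 + t.1])

-- trailing singleton counts: range loop of 1s vs list multiplication
theorem pvTail (s : Int) :
    (PySem.List.pyRange 0 s 1).map (fun _ => (1 : Int)) = List.replicate s.toNat 1 := by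
  rw [PySem.List.pyRange_one]
  simp only [List.map_map, Function.comp_def, List.map_const', List.length_range]
  norm_num

-- ===== VERDICT (by name: the statement is the Claim_ definition above) =====
theorem nationalities_spec : Claim_equal_nationalities := by
  unfold Claim_equal_nationalities
  intro graph n _ hpre
  unfold Spec_nationalities nationalities nationalities_alt
  simp only []
  set g := PySem.Dict.ofList graph with hgdef
  have hg : ∀ pr ∈ g.items, ∀ m ∈ pr.2, m ∈ g.keys := by
    intro pr hpr m hm
    exact (PySem.Dict.contains_iff_mem_keys g m).mp (hpre pr hpr m hm)
  have hempty : (PySem.Dict.empty : PySem.Dict Int Bool).keys = (PySem.Set.empty : PySem.Set Int) := by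
    simp [PySem.Dict.keys_empty, PySem.Set.empty]
  obtain ⟨h1, h2⟩ := pvTop g hg g.keys (fun k hk => hk) PySem.Dict.empty []
  rw [hempty] at h1 h2
  rw [h1, h2]
  congr 1
  · rw [pvTail]
    congr 2
    simp [PySem.Set.len, PySem.Dict.keys, PySem.Dict.size]
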